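-- pv_equiv track=rewrite | github.com/mr2coder/spider | web/python/utils/paperTool.py | sorted_by_times
-- ===== SOURCE A (Python) =====
-- def sorted_by_times(ls):
-- 	out_dict = {}
-- 	for line in ls:
-- 		if out_dict.get(line):
-- 			out_dict[line] +=1
-- 		else:
-- 			out_dict[line] = 1
-- 	c = sorted(out_dict.items(), key=lambda d:d[1],reverse=True)
-- 	return c
-- ===== SOURCE B (Python) =====
-- def sorted_by_times(ls):
--     counts = {}
--     for line in ls:
--         counts[line] = counts.get(line, 0) + 1
--     buckets = {}
--     for k, c in counts.items():
--         buckets.setdefault(c, []).append(k)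
--     chunks = []
--     for c in range(1, len(ls) + 1):
--         chunks.append([(k, c) for k in buckets.get(c, [])])
--     out = []
--     for chunk in reversed(chunks):
--         out.extend(chunk)
--     return out
-- ===== Notes on version B (the rewrite author's own statement) =====
-- stated objective: alternative
-- what changed: replaces the comparison sort of the count-dict items by a counting/bucket sort: keys are grouped into frequency buckets in insertion order and the output is assembled by prepending each bucket while frequencies run from 1 up to len(ls), so ties keep first-seen order without any comparison sort
import Mathlib
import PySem

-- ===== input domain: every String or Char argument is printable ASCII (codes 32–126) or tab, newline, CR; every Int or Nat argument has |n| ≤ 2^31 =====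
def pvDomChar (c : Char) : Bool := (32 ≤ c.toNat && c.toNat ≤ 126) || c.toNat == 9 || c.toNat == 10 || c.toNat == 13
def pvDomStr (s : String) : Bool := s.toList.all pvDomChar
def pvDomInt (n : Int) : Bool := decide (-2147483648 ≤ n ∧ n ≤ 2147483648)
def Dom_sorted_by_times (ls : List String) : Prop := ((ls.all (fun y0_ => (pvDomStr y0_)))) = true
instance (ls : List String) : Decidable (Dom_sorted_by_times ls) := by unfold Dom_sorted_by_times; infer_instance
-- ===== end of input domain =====

-- B replaces A's comparison sort of the count-dict items by a counting/bucket sort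
-- (frequency buckets filled in insertion order, output assembled bucket by bucket);
-- same return value, different algorithm ("alternative").

-- ===== PORT A =====
-- `if out_dict.get(line):` is truthy exactly when the key is present with a nonzero
-- value, i.e. exactly when `d.getD line 0 ≠ 0`; `out_dict[line] += 1` overwrites in
-- place (PySem.Dict.insert keeps the position of an existing key).
def sorted_by_times (ls : List String) : List (String × Int) :=
  let out_dict : PySem.Dict String Int :=
    ls.foldl (fun d line =>
      if d.getD line 0 ≠ 0 then d.insert line (d.getD line 0 + 1)
      else d.insert line 1) PySem.Dict.empty
  PySem.List.sorted out_dict.items (fun p => p.2) true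

-- ===== PORT B =====
def sorted_by_times_alt (ls : List String) : List (String × Int) :=
  let counts : PySem.Dict String Int :=
    ls.foldl (fun d line => d.insert line (d.getD line 0 + 1)) PySem.Dict.empty
  let buckets : PySem.Dict Int (List String) :=
    counts.items.foldl (fun b p => b.modify p.2 [] (fun l => l ++ [p.1])) PySem.Dict.empty
  let chunks : List (List (String × Int)) :=
    (PySem.List.pyRange 1 ((ls.length : Int) + 1)).foldl
      (fun cs c => cs ++ [(buckets.getD c []).map (fun k => (k, c))]) []
  chunks.reverse.foldl (fun out chunk => out ++ chunk) []

-- ===== PRECONDITION & SPEC =====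
def Spec_sorted_by_times (ls : List String) (out : List (String × Int)) : Prop := out = sorted_by_times_alt ls
instance (ls : List String) (out : List (String × Int)) : Decidable (Spec_sorted_by_times ls out) := by unfold Spec_sorted_by_times; infer_instance

-- ===== CLAIM (what is proved, stated in full; the proofs are below) =====
def Claim_equal_sorted_by_times : Prop := ∀ (ls : List String), Dom_sorted_by_times ls → Spec_sorted_by_times ls (sorted_by_times ls)

-- ===== LEMMAS AND PROOFS =====

-- A's counting loop equals B's: on a dict whose stored values are all positive the
-- truthiness test is exactly "key present", and then both branches insert getD+1.
theorem countA_eq_countB (ls : List String) (d : PySem.Dict String Int)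
    (hd : ∀ v ∈ d.values, 0 < v) :
    ls.foldl (fun d line =>
      if d.getD line 0 ≠ 0 then d.insert line (d.getD line 0 + 1)
      else d.insert line 1) d
    = ls.foldl (fun d line => d.insert line (d.getD line 0 + 1)) d := by
  induction ls generalizing d with
  | nil => rfl
  | cons line rest ih =>
    have hposD : d.getD line 0 = 0 ∨ 0 < d.getD line 0 := by
      rw [PySem.Dict.getD_eq_get?_getD]
      cases hg : d.get? line with
      | none => left; rfl
      | some v =>
        right
        have hv : v ∈ d.values := by
          have := PySem.Dict.mem_items_of_get?_eq_some d hg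
          simp only [PySem.Dict.values]
          exact List.mem_map.mpr ⟨_, this, rfl⟩
        simpa using hd v hv
    have hstep : ∀ w, ∀ v ∈ (d.insert line w).values, 0 < w → 0 < v := by
      intro w v hv hw
      rcases PySem.Dict.mem_values_insert d line w v hv with h | h
      · omega
      · exact hd v h
    simp only [List.foldl_cons]
    by_cases h : d.getD line 0 ≠ 0
    · simp only [if_pos h]
      exact ih _ (fun v hv => hstep _ v hv (by rcases hposD with h0 | h0 <;> omega))
    · simp only [if_neg h]
      simp only [ne_eq, not_not] at h
      rw [h]
      have : (0 : Int) + 1 = 1 := by norm_num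
      rw [this] at *
      exact ih _ (fun v hv => hstep _ v hv (by norm_num))

-- buckets lookup: the bucket at frequency c holds, in order, the first components
-- of the items whose count is c.
theorem buckets_getD (l : List (String × Int)) (c : Int) :
    (l.foldl (fun b p => b.modify p.2 [] (fun t => t ++ [p.1])) (PySem.Dict.empty : PySem.Dict Int (List String))).getD c []
    = (l.filter (fun p => p.2 == c)).map (fun p => p.1) := by
  have h : l.foldl (fun b p => b.modify p.2 [] (fun t => t ++ [p.1])) (PySem.Dict.empty : PySem.Dict Int (List String))
      = (l.map Prod.swap).foldl (fun b q => b.modify q.1 [] (fun t => t ++ [q.2])) PySem.Dict.empty := by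
    rw [List.foldl_map]
    rfl
  rw [h, PySem.Dict.getD_foldl_modify_append]
  simp [List.filter_map, Function.comp_def, Prod.swap]

-- re-pairing a bucket's keys with its frequency gives back the filtered items
theorem bucket_pairs (l : List (String × Int)) (c : Int) :
    ((l.filter (fun p => p.2 == c)).map (fun p => p.1)).map (fun k => (k, c))
    = l.filter (fun p => p.2 == c) := by
  induction l with
  | nil => rfl
  | cons p rest ih =>
    by_cases h : p.2 = c
    · subst h
      simp [List.filter_cons, ih]
    · simp [h, ih]

-- the bucket concatenation, frequency n down to 1, as a recursion on n
def bucketsF (n : Nat) (l : List (String × Int)) : List (String × Int) :=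
  match n with
  | 0 => []
  | n + 1 => l.filter (fun p => p.2 == ((n : Int) + 1)) ++ bucketsF n l

theorem bucketsF_nil (n : Nat) : bucketsF n [] = [] := by
  induction n with
  | zero => rfl
  | succ n ih => simp [bucketsF, ih]

theorem bucketsF_append_of_gt (k : Nat) (l : List (String × Int)) (x : String × Int)
    (hx : (k : Int) < x.2) : bucketsF k (l ++ [x]) = bucketsF k l := by
  induction k with
  | zero => rfl
  | succ k ih =>
    have hne : ¬ (x.2 == ((k : Int) + 1)) = true := by
      simp only [beq_iff_eq]
      push_cast at hx
      omega
    simp only [bucketsF, List.filter_append]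
    rw [ih (by push_cast at hx ⊢; omega)]
    simp [hne]

theorem mem_bucketsF_le (k : Nat) (l : List (String × Int)) (y : String × Int)
    (hy : y ∈ bucketsF k l) : y.2 ≤ (k : Int) := by
  induction k with
  | zero => simp [bucketsF] at hy
  | succ k ih =>
    simp only [bucketsF, List.mem_append] at hy
    rcases hy with h | h
    · have := List.of_mem_filter h
      simp only [beq_iff_eq] at this
      push_cast
      omega
    · have := ih h
      push_cast at this ⊢
      omega

-- the reversed per-frequency chunk list, flattened, IS bucketsF
theorem revmap_flatten_eq_bucketsF (n : Nat) (l : List (String × Int)) :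
    (((PySem.List.pyRange 1 ((n : Int) + 1)).map
        (fun c => l.filter (fun p => p.2 == c))).reverse).flatMap (fun ch => ch)
    = bucketsF n l := by
  induction n with
  | zero =>
    have h : PySem.List.pyRange 1 ((0 : Int) + 1) = [] := by decide
    simp [h, bucketsF]
  | succ n ih =>
    have hcast : ((n + 1 : Nat) : Int) + 1 = ((n : Int) + 1) + 1 := by push_cast; ring
    rw [hcast, PySem.List.pyRange_one_succ_right (by omega)]
    simp only [List.map_append, List.reverse_append, List.map_cons, List.map_nil,
      List.reverse_cons, List.reverse_nil, List.nil_append, List.cons_append,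
      List.flatMap_cons, ih]
    simp [bucketsF]

-- B's chunk building plus reverse-and-extend loop IS bucketsF
theorem chunks_eq_bucketsF (n : Nat) (l : List (String × Int)) :
    (((PySem.List.pyRange 1 ((n : Int) + 1)).foldl
        (fun cs c => cs ++ [l.filter (fun p => p.2 == c)])
        ([] : List (List (String × Int)))).reverse).foldl
      (fun out ch => out ++ ch) [] = bucketsF n l := by
  rw [PySem.List.foldl_append_singleton_eq_map, List.nil_append,
      PySem.List.foldl_append_eq_flatMap, List.nil_append,
      revmap_flatten_eq_bucketsF]

theorem insertBy_cons_of_all (before : String × Int → String × Int → Bool) (x : String × Int)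
    (bs : List (String × Int)) (h : ∀ y ∈ bs, before x y = true) :
    PySem.List.insertBy before x bs = x :: bs := by
  cases bs with
  | nil => rfl
  | cons y ys => simp [PySem.List.insertBy, h y (by simp)]

theorem insertBy_append (before : String × Int → String × Int → Bool) (x : String × Int)
    (as bs : List (String × Int)) (h : ∀ y ∈ as, before x y = false) :
    PySem.List.insertBy before x (as ++ bs) = as ++ PySem.List.insertBy before x bs := by
  induction as with
  | nil => rfl
  | cons a t ih =>
    simp only [List.cons_append, PySem.List.insertBy, h a (by simp)]
    simp only [Bool.false_eq_true, if_false, List.cons.injEq, true_and]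
    exact ih (fun y hy => h y (by simp [hy]))

-- inserting x (reverse order, stable) into the bucket concatenation puts it at the
-- end of its own frequency bucket
theorem insert_bucketsF (k : Nat) (x : String × Int) (l : List (String × Int))
    (h1 : 1 ≤ x.2) (h2 : x.2 ≤ (k : Int)) :
    PySem.List.insertBy (fun a b => decide (b.2 < a.2)) x (bucketsF k l)
    = bucketsF k (l ++ [x]) := by
  induction k with
  | zero => simp at h2; omega
  | succ k ih =>
    by_cases hx : x.2 = (k : Int) + 1
    · have hB : ∀ y ∈ l.filter (fun p => p.2 == ((k : Int) + 1)),
          (fun a b : String × Int => decide (b.2 < a.2)) x y = false := by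
        intro y hy
        have := List.of_mem_filter hy
        simp only [beq_iff_eq] at this
        simp [this, hx]
      have hR : ∀ y ∈ bucketsF k l,
          (fun a b : String × Int => decide (b.2 < a.2)) x y = true := by
        intro y hy
        have := mem_bucketsF_le k l y hy
        simp only [decide_eq_true_eq]
        omega
      simp only [bucketsF]
      rw [insertBy_append _ _ _ _ hB, insertBy_cons_of_all _ _ _ hR]
      rw [bucketsF_append_of_gt k l x (by omega)]
      simp [List.filter_append, hx]
    · have hx2 : x.2 ≤ (k : Int) := by push_cast at h2; omega
      have hB : ∀ y ∈ l.filter (fun p => p.2 == ((k : Int) + 1)),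
          (fun a b : String × Int => decide (b.2 < a.2)) x y = false := by
        intro y hy
        have := List.of_mem_filter hy
        simp only [beq_iff_eq] at this
        simp only [decide_eq_false_iff_not, not_lt, this]
        omega
      simp only [bucketsF]
      rw [insertBy_append _ _ _ _ hB, ih hx2]
      have hne : ¬ (x.2 == ((k : Int) + 1)) = true := by simp [hx]
      simp [List.filter_append, hne]

-- the reverse-stable sort by frequency IS the bucket concatenation
theorem sorted_eq_bucketsF (l : List (String × Int)) (n : Nat)
    (hb : ∀ p ∈ l, 1 ≤ p.2 ∧ p.2 ≤ (n : Int)) :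
    PySem.List.sorted l (fun p => p.2) true = bucketsF n l := by
  induction l using List.reverseRecOn with
  | nil =>
    rw [show PySem.List.sorted ([] : List (String × Int)) (fun p => p.2) true = [] from
      (PySem.List.sorted_eq_nil_iff _ _ _).mpr rfl, bucketsF_nil]
  | append_singleton l x ih =>
    rw [PySem.List.sorted_rev_eq_foldl_insertBy, List.foldl_append]
    simp only [List.foldl_cons, List.foldl_nil]
    rw [← PySem.List.sorted_rev_eq_foldl_insertBy,
        ih (fun p hp => hb p (by simp [hp]))]
    exact insert_bucketsF n x l (hb x (by simp)).1 (hb x (by simp)).2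

-- bounds on the counter's items: every count is between 1 and len(ls)
theorem counter_items_bounds (ls : List String) :
    ∀ p ∈ (PySem.Dict.counter ls).items, 1 ≤ p.2 ∧ p.2 ≤ ((ls.length : Int)) := by
  intro p hp
  rw [PySem.Dict.items_counter] at hp
  rcases List.mem_map.mp hp with ⟨k, hk, rfl⟩
  have hk' : k ∈ ls := (PySem.Set.mem_ofList ls k).mp hk
  have h1 : 0 < ls.count k := List.count_pos_iff.mpr hk'
  have h2 : ls.count k ≤ ls.length := List.count_le_length
  constructor <;> simp <;> omega

-- ===== VERDICT (by name: the statement is the Claim_ definition above) =====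
theorem sorted_by_times_spec : Claim_equal_sorted_by_times := by
  intro ls _
  unfold Spec_sorted_by_times sorted_by_times sorted_by_times_alt
  simp only []
  rw [countA_eq_countB ls PySem.Dict.empty (by simp [PySem.Dict.values, PySem.Dict.empty])]
  rw [PySem.Dict.foldl_insert_getD_add_one_eq_counter]
  simp only [buckets_getD, bucket_pairs]
  rw [chunks_eq_bucketsF ls.length (PySem.Dict.counter ls).items]
  exact sorted_eq_bucketsF _ _ (counter_items_bounds ls)
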